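-- pv_equiv track=rewrite | github.com/Leoglme/GoupixDex | api/services/ebay_browse_service.py | _extract_grade
-- ===== SOURCE A (Python) =====
-- def _extract_grade(upper_title: str, grader_kw: str) -> str:
--     """Naive grade extractor: find digit/float right after ``grader_kw``."""
--     idx = upper_title.find(grader_kw.upper())
--     if idx == -1:
--         return ""
--     chunk = upper_title[idx + len(grader_kw) : idx + len(grader_kw) + 8]
--     digits: list[str] = []
--     has_digit = False
--     for ch in chunk:
--         if ch.isdigit():
--             digits.append(ch)
--             has_digit = True
--         elif has_digit and ch in (".", ","):
--             digits.append(".")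
--         elif has_digit:
--             break
--     return "".join(digits).strip(".")
-- ===== SOURCE B (Python) =====
-- def _extract_grade(upper_title: str, grader_kw: str) -> str:
--     """Two-phase: find the first digit, extend right over digits/'.'/',', then slice+map+strip."""
--     idx = upper_title.find(grader_kw.upper())
--     if idx == -1:
--         return ""
--     chunk = upper_title[idx + len(grader_kw) : idx + len(grader_kw) + 8]
--     start = next((i for i, c in enumerate(chunk) if c.isdigit()), None)
--     if start is None:
--         return ""
--     rest = chunk[start:]
--     end = next((i for i, c in enumerate(rest) if not (c.isdigit() or c in ".,")), len(rest))
--     return "".join("." if c == "," else c for c in rest[:end]).strip(".")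
-- ===== Notes on version B (the rewrite author's own statement) =====
-- stated objective: alternative
-- what changed: Replaces A's single-pass has_digit state machine (accumulating chars with a break) by a two-phase decomposition: find the index of the first digit in the chunk, find the end of the digit/'.'/',' run after it, then slice, map ','->'.' and strip '.'.
import Mathlib
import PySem

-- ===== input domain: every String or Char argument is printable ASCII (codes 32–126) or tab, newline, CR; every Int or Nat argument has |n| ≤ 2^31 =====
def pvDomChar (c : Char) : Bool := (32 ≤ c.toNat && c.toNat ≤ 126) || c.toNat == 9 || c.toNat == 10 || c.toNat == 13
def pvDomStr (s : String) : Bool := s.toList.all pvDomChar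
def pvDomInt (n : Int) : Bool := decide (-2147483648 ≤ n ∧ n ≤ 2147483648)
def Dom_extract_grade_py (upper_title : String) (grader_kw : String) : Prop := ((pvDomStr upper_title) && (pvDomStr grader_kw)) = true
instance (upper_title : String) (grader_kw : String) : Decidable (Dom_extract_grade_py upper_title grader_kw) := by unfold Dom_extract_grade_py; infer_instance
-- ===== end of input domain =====

-- B replaces A's has_digit state machine with a two-phase find-first-digit / find-end then slice+map+strip decomposition (objective: alternative, same cost).
-- ===== PORT A =====
-- A's for-loop: break is modeled by returning the accumulator; state = (digits, has_digit)
def pvLoopA : List Char → List Char → Bool → List Char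
  | [], digits, _ => digits
  | c :: rest, digits, hd =>
    if PySem.Chars.isdigit c then pvLoopA rest (digits ++ [c]) true
    else if hd && (c == '.' || c == ',') then pvLoopA rest (digits ++ ['.']) hd
    else if hd then digits
    else pvLoopA rest digits hd

def extract_grade_py (upper_title : String) (grader_kw : String) : String :=
  let idx := PySem.Str.find upper_title (PySem.Str.upper grader_kw)
  if idx == -1 then "" else
  let k : Int := PySem.Str.len grader_kw
  let chunk := PySem.List.slice upper_title.toList (some (idx + k)) (some (idx + k + 8))
  String.ofList (PySem.Chars.stripChars (pvLoopA chunk [] false) ['.'])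

-- ===== PORT B =====
-- c.isdigit() or c in ".,"
def pvGradeP (c : Char) : Bool := PySem.Chars.isdigit c || c == '.' || c == ','

def extract_grade_py_alt (upper_title : String) (grader_kw : String) : String :=
  let idx := PySem.Str.find upper_title (PySem.Str.upper grader_kw)
  if idx == -1 then "" else
  let k : Int := PySem.Str.len grader_kw
  let chunk := PySem.List.slice upper_title.toList (some (idx + k)) (some (idx + k + 8))
  match chunk.findIdx? (fun c => PySem.Chars.isdigit c) with
  | none => ""
  | some start =>
    let rest := chunk.drop start
    let e := (rest.findIdx? (fun c => !pvGradeP c)).getD rest.length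
    String.ofList (PySem.Chars.stripChars
      ((rest.take e).map (fun c => if c == ',' then '.' else c)) ['.'])

-- ===== PRECONDITION & SPEC =====
def Spec_extract_grade_py (upper_title : String) (grader_kw : String) (out : String) : Prop := out = extract_grade_py_alt upper_title grader_kw
instance (upper_title : String) (grader_kw : String) (out : String) : Decidable (Spec_extract_grade_py upper_title grader_kw out) := by unfold Spec_extract_grade_py; infer_instance

-- ===== CLAIM (what is proved, stated in full; the proofs are below) =====
def Claim_equal_extract_grade_py : Prop := ∀ (upper_title : String) (grader_kw : String), Dom_extract_grade_py upper_title grader_kw → Spec_extract_grade_py upper_title grader_kw (extract_grade_py upper_title grader_kw)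

-- ===== LEMMAS AND PROOFS =====

-- the ','→'.' replacement B maps over the collected span
def pvRepl (c : Char) : Char := if c == ',' then '.' else c

lemma pvDigit_ne_comma {c : Char} (hd : PySem.Chars.isdigit c = true) : c ≠ ',' := by
  intro h; subst h; exact absurd hd (by decide)

lemma pvTake_findIdx_eq_takeWhile (p : Char → Bool) (cs : List Char) :
    cs.take ((cs.findIdx? (fun c => !p c)).getD cs.length) = cs.takeWhile p := by
  induction cs with
  | nil => simp
  | cons c rest ih =>
    by_cases h : p c
    · have hfc : (c :: rest).findIdx? (fun c => !p c) =
          (rest.findIdx? (fun c => !p c)).map (· + 1) := by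
        simp [List.findIdx?_cons, h]
      rw [hfc, List.takeWhile_cons, if_pos h, ← ih]
      cases hf : rest.findIdx? (fun c => !p c) <;> simp
    · rw [List.findIdx?_cons]
      simp [h]

lemma pvLoopA_true (cs : List Char) (acc : List Char) :
    pvLoopA cs acc true = acc ++ (cs.takeWhile pvGradeP).map pvRepl := by
  induction cs generalizing acc with
  | nil => simp [pvLoopA]
  | cons c rest ih =>
    by_cases hd : PySem.Chars.isdigit c
    · have hne := pvDigit_ne_comma hd
      simp [pvLoopA, hd, pvGradeP, ih, pvRepl, hne]
    · by_cases hp : (c == '.' || c == ',') = true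
      · simp [pvLoopA, hd, hp, pvGradeP, ih]
        rcases Bool.or_eq_true_iff.mp hp with h | h <;> simp_all [pvRepl]
      · simp only [Bool.or_eq_true, not_or] at hp
        simp [pvLoopA, hd, hp.1, hp.2, pvGradeP]

lemma pvLoopA_false (cs : List Char) (acc : List Char) :
    pvLoopA cs acc false = acc ++
      (match cs.findIdx? (fun c => PySem.Chars.isdigit c) with
       | none => []
       | some s => ((cs.drop s).takeWhile pvGradeP).map pvRepl) := by
  induction cs generalizing acc with
  | nil => simp [pvLoopA]
  | cons c rest ih =>
    by_cases hd : PySem.Chars.isdigit c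
    · have hne := pvDigit_ne_comma hd
      simp [pvLoopA, hd, List.findIdx?_cons, pvLoopA_true, pvGradeP, pvRepl, hne]
    · have hskip : pvLoopA (c :: rest) acc false = pvLoopA rest acc false := by
        simp [pvLoopA, hd]
      have hfc : (c :: rest).findIdx? (fun c => PySem.Chars.isdigit c) =
          (rest.findIdx? (fun c => PySem.Chars.isdigit c)).map (· + 1) := by
        simp [List.findIdx?_cons, hd]
      rw [hskip, ih acc, hfc]
      cases hf : rest.findIdx? (fun c => PySem.Chars.isdigit c) with
      | none => simp
      | some i => simp [List.drop_succ_cons]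

lemma pvChunk_eq (chunk : List Char) :
    String.ofList (PySem.Chars.stripChars (pvLoopA chunk [] false) ['.']) =
      (match chunk.findIdx? (fun c => PySem.Chars.isdigit c) with
       | none => ""
       | some start =>
         let rest := chunk.drop start
         let e := (rest.findIdx? (fun c => !pvGradeP c)).getD rest.length
         String.ofList (PySem.Chars.stripChars
           ((rest.take e).map (fun c => if c == ',' then '.' else c)) ['.'])) := by
  rw [pvLoopA_false]
  cases hf : chunk.findIdx? (fun c => PySem.Chars.isdigit c) with
  | none =>
    have h0 : PySem.Chars.stripChars [] ['.'] = ([] : List Char) := by decide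
    simp [h0]
  | some s =>
    simp only [List.nil_append]
    rw [pvTake_findIdx_eq_takeWhile pvGradeP (chunk.drop s)]
    rfl

-- ===== VERDICT (by name: the statement is the Claim_ definition above) =====
theorem extract_grade_py_spec : Claim_equal_extract_grade_py := by
  intro upper_title grader_kw _hdom
  show extract_grade_py upper_title grader_kw = extract_grade_py_alt upper_title grader_kw
  unfold extract_grade_py extract_grade_py_alt
  by_cases hidx : (PySem.Str.find upper_title (PySem.Str.upper grader_kw) == -1) = true
  · rw [if_pos hidx, if_pos hidx]
  · rw [if_neg hidx, if_neg hidx]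
    exact pvChunk_eq _
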